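-- pv_equiv track=rewrite | github.com/desmid/demo | pythonpath/Cell.py | _name2posn
-- ===== SOURCE A (Python) =====
-- ORD_A = ord('A')
--
-- def _name2posn(n=''):
--     """Convert spreadsheet cell names ('A1', AZ2', etc.) and return a
--     pair of 0-based positions as a tuple: (column, row).
--
--     Example usage and return values:
--
--     _name2posn('')     =>  (0,0)
--     _name2posn('0')    =>  (0,0)
--     _name2posn('A')    =>  (0,0)
--     _name2posn('A0')   =>  (0,0)
--     _name2posn('A1')   =>  (0,0)
--
--     _name2posn('B')    =>  (1,0)
--     _name2posn('B0')   =>  (1,0)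
--     _name2posn('B1')   =>  (1,0)
--     _name2posn('B2')   =>  (1,1)
--     _name2posn('Z')    =>  (25,0)
--     _name2posn('AA')   =>  (26,0)
--     _name2posn('AZ')   =>  (51,0)
--     _name2posn('BA')   =>  (52,0)
--     _name2posn('ZZ')   =>  (701,0)
--     _name2posn('AAA')  =>  (702,0)
--
--     """
--     #0-based arithmetic
--     c, r = 0, 0
--     while len(n) > 0:
--         v = ord(n[0])
--         if v < ORD_A:
--             r = int(n)
--             break
--         c = 26*c + v-ORD_A+1
--         n = n[1:]
--     if c > 0: c -= 1
--     if r > 0: r -= 1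
--     return (c, r)
-- ===== SOURCE B (Python) =====
-- ORD_A = ord('A')
--
-- def _name2posn(n=''):
--     i = 0
--     while i < len(n) and ord(n[i]) >= ORD_A:
--         i += 1
--     c = 0
--     for ch in n[:i]:
--         c = 26 * c + ord(ch) - ORD_A + 1
--     r = int(n[i:]) if i < len(n) else 0
--     if c > 0:
--         c -= 1
--     if r > 0:
--         r -= 1
--     return (c, r)
-- ===== Notes on version B (the rewrite author's own statement) =====
-- stated objective: alternative
-- what changed: Replaces A's single destructive while-loop that slices the string and breaks mid-loop into a two-phase decomposition: first compute the split index of the maximal ord>=ORD_A prefix, then a Horner fold over the prefix and one int() on the suffix.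
import Mathlib
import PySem

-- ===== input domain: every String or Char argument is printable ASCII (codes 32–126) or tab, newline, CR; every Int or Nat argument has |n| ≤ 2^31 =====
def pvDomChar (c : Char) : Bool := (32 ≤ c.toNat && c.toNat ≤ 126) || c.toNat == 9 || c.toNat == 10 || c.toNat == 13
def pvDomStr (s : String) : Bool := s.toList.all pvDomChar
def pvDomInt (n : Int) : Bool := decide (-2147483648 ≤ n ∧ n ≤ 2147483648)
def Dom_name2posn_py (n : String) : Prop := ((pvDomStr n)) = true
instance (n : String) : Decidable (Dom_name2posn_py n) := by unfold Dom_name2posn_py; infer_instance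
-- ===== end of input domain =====

-- B replaces A's destructive slice-and-break while-loop by a two-phase split-index + Horner-fold decomposition (alternative, same cost).


-- ===== PORT A =====
-- A's while-loop: state is the remaining string (as chars) and the accumulator c.
-- Returns (c, some r) on normal exit; none models int(n) raising ValueError (excluded by Pre_).
def name2posn_py_loop (cs : List Char) (c : Int) : Int × Option Int :=
  match cs with
  | [] => (c, some 0)
  | ch :: rest =>
      if ch.toNat < 65 then (c, PySem.Int.ofChars? (ch :: rest))
      else name2posn_py_loop rest (26 * c + (ch.toNat : Int) - 65 + 1)

def name2posn_py (n : String) : Int × Int :=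
  match name2posn_py_loop n.toList 0 with
  | (c, some r) => (if c > 0 then c - 1 else c, if r > 0 then r - 1 else r)
  | (c, none) => (c, 0)  -- unreachable under Pre_ (int(n) raises ValueError there)

-- ===== PORT B =====
def name2posn_py_alt (n : String) : Int × Int :=
  let cs := n.toList
  let pre := cs.takeWhile (fun ch => decide (65 ≤ ch.toNat))
  let rest := cs.dropWhile (fun ch => decide (65 ≤ ch.toNat))
  let c := pre.foldl (fun c ch => 26 * c + (ch.toNat : Int) - 65 + 1) 0
  let r : Int := if rest.isEmpty then 0 else (PySem.Int.ofChars? rest).getD 0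
  (if c > 0 then c - 1 else c, if r > 0 then r - 1 else r)

-- ===== PRECONDITION & SPEC =====
-- Pre_ excludes exactly the inputs where int() on the non-letter suffix raises ValueError in both programs.
def Pre_name2posn_py (n : String) : Prop :=
  n.toList.dropWhile (fun ch => decide (65 ≤ ch.toNat)) = [] ∨
  (PySem.Int.ofChars? (n.toList.dropWhile (fun ch => decide (65 ≤ ch.toNat)))).isSome = true
instance (n : String) : Decidable (Pre_name2posn_py n) := by unfold Pre_name2posn_py; infer_instance
def pvWitness_name2posn_py : String := "AZ42"

def Spec_name2posn_py (n : String) (out : Int × Int) : Prop := out = name2posn_py_alt n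
instance (n : String) (out : Int × Int) : Decidable (Spec_name2posn_py n out) := by unfold Spec_name2posn_py; infer_instance

-- ===== CLAIM (what is proved, stated in full; the proofs are below) =====
def Claim_equal_name2posn_py : Prop := ∀ (n : String), Dom_name2posn_py n → Pre_name2posn_py n → Spec_name2posn_py n (name2posn_py n)

-- ===== LEMMAS AND PROOFS =====

theorem name2posn_py_loop_eq (cs : List Char) (c : Int) :
    name2posn_py_loop cs c =
      ((cs.takeWhile (fun ch => decide (65 ≤ ch.toNat))).foldl
          (fun c ch => 26 * c + (ch.toNat : Int) - 65 + 1) c,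
        if cs.dropWhile (fun ch => decide (65 ≤ ch.toNat)) = [] then some 0
        else PySem.Int.ofChars? (cs.dropWhile (fun ch => decide (65 ≤ ch.toNat)))) := by
  induction cs generalizing c with
  | nil => simp [name2posn_py_loop]
  | cons ch rest ih =>
      by_cases h : 65 ≤ ch.toNat
      · have hlt : ¬ (ch.toNat < 65) := by omega
        simp [name2posn_py_loop, hlt, h, List.takeWhile, List.dropWhile, ih]
      · have hlt : (ch.toNat : Int) < 65 := by omega
        simp [name2posn_py_loop, hlt, h, List.takeWhile, List.dropWhile]

-- ===== VERDICT (by name: the statement is the Claim_ definition above) =====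
theorem name2posn_py_spec : Claim_equal_name2posn_py := by
  intro n _ hpre
  unfold Spec_name2posn_py name2posn_py name2posn_py_alt
  rw [name2posn_py_loop_eq]
  by_cases he : n.toList.dropWhile (fun ch => decide (65 ≤ ch.toNat)) = []
  · have hall : ∀ x ∈ n.toList, 65 ≤ x.toNat := by
      simpa [List.dropWhile_eq_nil_iff] using he
    rw [if_pos he]
    simp [he, hall]
  · rcases hpre with h | h
    · exact absurd h he
    rcases Option.isSome_iff_exists.mp h with ⟨v, hv⟩
    have hall : ¬ ∀ x ∈ n.toList, 65 ≤ x.toNat := by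
      simpa [List.dropWhile_eq_nil_iff] using he
    rw [if_neg he, hv]
    simp [hall, hv, List.isEmpty_iff, he]
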